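-- pv_equiv track=rewrite | github.com/JeroenDunselman/Ietsmet | app.py | build_sett
-- ===== SOURCE A (Python) =====
-- def build_sett(pattern):
--     """Maakt perfecte symmetrische sett (zoals echte Schotse wevers)"""
--     forward_counts = [count for _, count in pattern]
--     forward_colors  = [col   for col, _ in pattern]
--
--     # Mirror zonder de pivot-kleur dubbel te tellen
--     mirror_counts = forward_counts[::-1][1:]
--     mirror_colors = forward_colors[::-1][1:]
--
--     sett_counts = forward_counts + mirror_counts
--     sett_colors = forward_colors + mirror_colors
--     return sett_counts, sett_colors
-- ===== SOURCE B (Python) =====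
-- def build_sett(pattern):
--     """Build the symmetric sett by palindrome index arithmetic: element i of the
--     result corresponds to pattern[min(i, 2n-2-i)] for i in range(2n-1)."""
--     n = len(pattern)
--     counts, colors = [], []
--     for i in range(max(0, 2 * n - 1)):
--         col, cnt = pattern[min(i, 2 * n - 2 - i)]
--         counts.append(cnt)
--         colors.append(col)
--     return counts, colors
-- ===== Notes on version B (the rewrite author's own statement) =====
-- stated objective: alternative
-- what changed: B computes each output element directly by palindrome index arithmetic (result[i] = pattern[min(i, 2n-2-i)] for i in range(2n-1)) in one index loop, instead of A's unzip-then-reverse/slice/concatenate list pipeline.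
import Mathlib
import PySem

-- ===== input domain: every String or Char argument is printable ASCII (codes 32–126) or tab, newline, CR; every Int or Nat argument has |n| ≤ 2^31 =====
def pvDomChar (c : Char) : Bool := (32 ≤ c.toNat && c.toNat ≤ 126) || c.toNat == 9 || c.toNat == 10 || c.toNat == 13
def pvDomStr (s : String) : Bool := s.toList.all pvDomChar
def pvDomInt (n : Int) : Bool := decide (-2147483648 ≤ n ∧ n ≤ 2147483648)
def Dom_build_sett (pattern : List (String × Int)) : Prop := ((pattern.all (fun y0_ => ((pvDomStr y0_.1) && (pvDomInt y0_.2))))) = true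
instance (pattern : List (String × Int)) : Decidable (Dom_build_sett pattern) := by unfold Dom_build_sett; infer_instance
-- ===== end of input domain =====

-- B builds the symmetric sett by palindrome index arithmetic (result index i ↦ pattern[min(i, 2n-2-i)])
-- instead of A's unzip-reverse-slice-concatenate pipeline; objective: alternative decomposition, same cost.

-- ===== PORT A =====
def build_sett (pattern : List (String × Int)) : List Int × List String :=
  let forward_counts := pattern.map (fun p => p.2)
  let forward_colors := pattern.map (fun p => p.1)
  let mirror_counts := PySem.List.slice ((PySem.List.slice? forward_counts none none (-1)).getD []) (some 1) none
  let mirror_colors := PySem.List.slice ((PySem.List.slice? forward_colors none none (-1)).getD []) (some 1) none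
  (forward_counts ++ mirror_counts, forward_colors ++ mirror_colors)

-- ===== PORT B =====
-- pattern[min(i, 2n-2-i)]: the index is always in range (0 ≤ min i (2n-2-i) < n for every
-- i in range(max(0, 2n-1))), so Python never raises here; pyGetD's default is unreachable.
def build_sett_alt (pattern : List (String × Int)) : List Int × List String :=
  let n : Int := pattern.length
  (PySem.List.pyRange 0 (max 0 (2 * n - 1)) 1).foldl
    (fun acc i =>
      let p := PySem.List.pyGetD pattern (min i (2 * n - 2 - i)) ("", 0)
      (acc.1 ++ [p.2], acc.2 ++ [p.1]))
    ([], [])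

-- ===== PRECONDITION & SPEC =====
def Spec_build_sett (pattern : List (String × Int)) (out : List Int × List String) : Prop := out = build_sett_alt pattern
instance (pattern : List (String × Int)) (out : List Int × List String) : Decidable (Spec_build_sett pattern out) := by unfold Spec_build_sett; infer_instance

-- ===== CLAIM =====
def Claim_equal_build_sett : Prop := ∀ (pattern : List (String × Int)), Dom_build_sett pattern → Spec_build_sett pattern (build_sett pattern)

-- ===== LEMMAS AND PROOFS =====

-- The palindrome-index map over range(2n-1) IS the mirrored pattern list.
theorem pv_palindrome_map (pattern : List (String × Int)) :
    (PySem.List.pyRange 0 (max 0 (2 * (pattern.length : Int) - 1)) 1).map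
      (fun i => PySem.List.pyGetD pattern (min i (2 * (pattern.length : Int) - 2 - i)) ("", 0))
    = pattern ++ pattern.reverse.tail := by
  by_cases hp : pattern = []
  · subst hp; simp [PySem.List.pyRange_one_eq_nil]
  · set l := pattern with hl
    have hn' : 1 ≤ l.length := List.length_pos_of_ne_nil hp
    have hn : (1 : Int) ≤ (l.length : Int) := by exact_mod_cast hn'
    have hmax : max 0 (2 * (l.length : Int) - 1) = 2 * (l.length : Int) - 1 := by omega
    rw [hmax]
    apply List.ext_getElem
    · simp [PySem.List.length_pyRange_one]
      omega
    · intro k hk1 hk2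
      have hklen : k < 2 * l.length - 1 := by
        simp [PySem.List.length_pyRange_one] at hk1; omega
      simp only [List.getElem_map, PySem.List.getElem_pyRange_one]
      by_cases hcase : k < l.length
      · have hmin : min ((0 : Int) + k) (2 * (l.length : Int) - 2 - (0 + k)) = (k : Int) := by omega
        rw [hmin, PySem.List.pyGetD_eq_getElem l _ (by omega) (by exact_mod_cast hcase)]
        rw [List.getElem_append_left hcase]
        congr 1
      · have hmin : min ((0 : Int) + k) (2 * (l.length : Int) - 2 - (0 + k))
            = 2 * (l.length : Int) - 2 - k := by omega
        rw [hmin, PySem.List.pyGetD_eq_getElem l _ (by omega) (by omega)]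
        have hkn : l.length ≤ k := by omega
        rw [List.getElem_append_right hkn]
        rw [List.getElem_tail, List.getElem_reverse]
        congr 1
        have : (2 * (l.length : Int) - 2 - (k : Int)).toNat = 2 * l.length - 2 - k := by omega
        rw [this]; omega

-- ===== VERDICT =====
theorem build_sett_spec : Claim_equal_build_sett := by
  intro pattern _
  unfold Spec_build_sett build_sett build_sett_alt
  simp only [PySem.List.slice?_none_none_neg_one, Option.getD_some, PySem.List.slice_from_one]
  rw [PySem.List.foldl_prod_mk
      (fun (a : List Int) (i : Int) => a ++ [(PySem.List.pyGetD pattern (min i (2 * (pattern.length : Int) - 2 - i)) ("", 0)).2])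
      (fun (a : List String) (i : Int) => a ++ [(PySem.List.pyGetD pattern (min i (2 * (pattern.length : Int) - 2 - i)) ("", 0)).1])]
  simp only [PySem.List.foldl_append_singleton_eq_map, List.nil_append]
  have H := pv_palindrome_map pattern
  have H2 := congrArg (List.map (fun p : String × Int => p.2)) H
  have H1 := congrArg (List.map (fun p : String × Int => p.1)) H
  rw [List.map_map] at H1 H2
  simp only [Function.comp_def] at H1 H2
  rw [H1, H2]
  simp [List.map_reverse]
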